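-- pv_equiv track=rewrite | github.com/kanglicheng/rosalind | inputparser.py | parse_multiple_graphs
-- ===== SOURCE A (Python) =====
-- def parse_multiple_graphs(data):
--     graphs = []
--     start = 2
--     index = 2
--     while index < len(data)+1:
--         if index == len(data) or data[index] == []:
--             graphs.append(data[start:index])
--             start = index+1
--         index += 1
--     return graphs
-- ===== SOURCE B (Python) =====
-- def parse_multiple_graphs(data):
--     if len(data) < 2:
--         return []
--     graphs = []
--     current = []
--     for item in data[2:]:
--         if item == []:
--             graphs.append(current)
--             current = []
--         else:
--             current.append(item)
--     graphs.append(current)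
--     return graphs
-- ===== Notes on version B (the rewrite author's own statement) =====
-- stated objective: simpler
-- what changed: Replaced A's while-loop over indices with start/index bookkeeping and repeated list slicing by a single delimiter-driven accumulation over the data after the two header rows, keeping a current group and emitting it at each empty-row delimiter and once at the end, with a short-input guard.
import Mathlib
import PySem

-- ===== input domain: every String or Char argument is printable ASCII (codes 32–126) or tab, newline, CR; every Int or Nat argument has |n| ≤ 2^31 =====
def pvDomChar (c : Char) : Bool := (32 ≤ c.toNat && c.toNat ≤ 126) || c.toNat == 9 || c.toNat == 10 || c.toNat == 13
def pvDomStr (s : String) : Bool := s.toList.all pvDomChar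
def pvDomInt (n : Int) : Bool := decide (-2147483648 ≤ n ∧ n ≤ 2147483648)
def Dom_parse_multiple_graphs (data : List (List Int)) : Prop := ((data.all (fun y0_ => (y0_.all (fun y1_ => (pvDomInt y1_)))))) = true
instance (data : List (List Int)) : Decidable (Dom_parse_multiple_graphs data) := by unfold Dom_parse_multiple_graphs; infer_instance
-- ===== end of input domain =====

-- B replaces A's index/slice scanning loop with delimiter-driven accumulation over data[2:] (objective: simpler).

-- ===== PORT A =====
-- A's while loop: index scans from 2 to len(data); on a delimiter (or at the end) the
-- slice data[start:index] is appended and start jumps past the delimiter.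
def pmgLoop (data : List (List Int)) (graphs : List (List (List Int))) (start index : Int) :
    List (List (List Int)) :=
  if h : index < (data.length : Int) + 1 then
    if index = (data.length : Int) ∨ PySem.List.pyGet? data index = some [] then
      pmgLoop data (graphs ++ [PySem.List.slice data (some start) (some index)]) (index + 1) (index + 1)
    else
      pmgLoop data graphs start (index + 1)
  else graphs
termination_by ((data.length : Int) + 1 - index).toNat
decreasing_by all_goals (simp at *; omega)

def parse_multiple_graphs (data : List (List Int)) : List (List (List Int)) :=
  pmgLoop data [] 2 2

-- ===== PORT B =====
-- B's for-loop over data[2:] with accumulator `current`; final append of `current`.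
def pmgGroup (current : List (List Int)) : List (List Int) → List (List (List Int))
  | [] => [current]
  | item :: rest =>
    if item = [] then current :: pmgGroup [] rest
    else pmgGroup (current ++ [item]) rest

def parse_multiple_graphs_alt (data : List (List Int)) : List (List (List Int)) :=
  if (data.length : Int) < 2 then []
  else pmgGroup [] (PySem.List.slice data (some 2) none)

-- ===== PRECONDITION & SPEC =====
def Spec_parse_multiple_graphs (data : List (List Int)) (out : List (List (List Int))) : Prop := out = parse_multiple_graphs_alt data
instance (data : List (List Int)) (out : List (List (List Int))) : Decidable (Spec_parse_multiple_graphs data out) := by unfold Spec_parse_multiple_graphs; infer_instance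

-- ===== CLAIM (what is proved, stated in full; the proofs are below) =====
def Claim_equal_parse_multiple_graphs : Prop := ∀ (data : List (List Int)), Dom_parse_multiple_graphs data → Spec_parse_multiple_graphs data (parse_multiple_graphs data)

-- ===== LEMMAS AND PROOFS =====

-- Loop invariant: with natural positions s ≤ i ≤ len, A's loop yields the groups already
-- emitted plus B's grouping of the open slice data[s:i] followed by the rest data[i:].
theorem pmgLoop_eq (data : List (List Int)) (graphs : List (List (List Int))) (s i : Nat)
    (hsi : s ≤ i) (hil : i ≤ data.length) :
    pmgLoop data graphs (s : Int) (i : Int) =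
      graphs ++ pmgGroup ((data.drop s).take (i - s)) (data.drop i) := by
  induction hn : data.length - i generalizing graphs s i with
  | zero =>
    have hie : i = data.length := by omega
    rw [pmgLoop]
    simp only [hie, lt_add_iff_pos_right, zero_lt_one, dite_true]
    simp only [true_or, ite_true]
    rw [pmgLoop]
    have hnl : ¬ ((data.length : Int) + 1 < (data.length : Int) + 1) := by omega
    simp only [hnl, dite_false]
    rw [PySem.List.slice_natCast]
    simp [List.drop_length, pmgGroup]
  | succ n ih =>
    have hil' : i < data.length := by omega
    rw [pmgLoop]
    have hlt : (i : Int) < (data.length : Int) + 1 := by exact_mod_cast by omega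
    simp only [hlt, dite_true]
    have hget : PySem.List.pyGet? data (i : Int) = some (data[i]'hil') := by
      simp [PySem.List.pyGet?, PySem.List.pyIdx?, hil']
      try omega
    have hdropi : data.drop i = data[i]'hil' :: data.drop (i + 1) :=
      List.drop_eq_getElem_cons hil'
    by_cases hd : data[i]'hil' = []
    · have hcond : (i : Int) = (data.length : Int) ∨ PySem.List.pyGet? data (i : Int) = some [] := by
        right; rw [hget, hd]
      simp only [hcond, ite_true]
      have : ((i : Int) + 1) = ((i + 1 : Nat) : Int) := by push_cast; ring
      rw [this, ih _ (i + 1) (i + 1) (le_refl _) (by omega) (by omega)]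
      rw [PySem.List.slice_natCast]
      rw [hdropi, pmgGroup]
      simp [hd]
    · have hcond : ¬ ((i : Int) = (data.length : Int) ∨ PySem.List.pyGet? data (i : Int) = some []) := by
        push Not
        constructor
        · exact_mod_cast by omega
        · rw [hget]; simp [hd]
      simp only [hcond, ite_false]
      have : ((i : Int) + 1) = ((i + 1 : Nat) : Int) := by push_cast; ring
      rw [this, ih _ s (i + 1) (by omega) (by omega) (by omega)]
      rw [hdropi, pmgGroup]
      simp only [hd, ite_false]
      congr 2
      have : (data.drop s).take (i + 1 - s) = (data.drop s).take (i - s) ++ [data[i]'hil'] := by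
        have h1 : i + 1 - s = (i - s) + 1 := by omega
        rw [h1, List.take_add_one]
        congr 1
        have h2 : (data.drop s)[i - s]? = some (data[i]'hil') := by
          rw [List.getElem?_drop]
          have hsi' : s + (i - s) = i := by omega
          rw [hsi', List.getElem?_eq_getElem hil']
        simp [h2]
      rw [this]

-- ===== VERDICT (by name: the statement is the Claim_ definition above) =====
theorem parse_multiple_graphs_spec : Claim_equal_parse_multiple_graphs := by
  intro data _
  unfold Spec_parse_multiple_graphs parse_multiple_graphs parse_multiple_graphs_alt
  by_cases h : (data.length : Int) < 2
  · simp only [h, ite_true]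
    rw [pmgLoop]
    have : ¬ ((2 : Int) < (data.length : Int) + 1) := by omega
    simp [this]
  · simp only [h, ite_false]
    have h2 : 2 ≤ data.length := by exact_mod_cast by omega
    have := pmgLoop_eq data [] 2 2 (le_refl _) h2
    norm_num at this
    rw [this]
    have hs : PySem.List.slice data (some (2:Int)) none = data.drop 2 := by
      have h22 : ((2:Nat) : Int) = (2:Int) := by norm_num
      rw [← h22, PySem.List.slice_from_natCast]
    rw [hs]
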